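-- pv_equiv track=rewrite | github.com/iuliagroza/Censor-Dispenser | censor_dispenser.py | censor_word_after
-- ===== SOURCE A (Python) =====
-- def censored(phrase):
--     censor = ""
--     for char in phrase:
--         if char == " ":
--             censor += " "
--         else:
--             censor += "*"
--     return censor
--
-- def censor_word_after(text, i, phrase):
--     start = i + len(phrase)
--     while start < len(text) and text[start].isalpha() == False:
--         start += 1
--     finish = start
--     while finish < len(text) and text[finish].isalpha() == True:
--         finish += 1
--     censor_after = censored(text[start:finish])
--     return text[:start] + censor_after + text[finish:]
-- ===== SOURCE B (Python) =====
-- def censor_word_after(text, i, phrase):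
--     # Single forward pass over the suffix with a 3-state machine (before the
--     # word / inside it / past it), instead of A's two index-scanning while
--     # loops plus a mask-building helper.
--     cut = i + len(phrase)
--     out = []
--     state = 0  # 0: before the word, 1: inside it, 2: past it
--     for c in text[cut:]:
--         a = c.isalpha()
--         if state == 0 and a:
--             state = 1
--         elif state == 1 and not a:
--             state = 2
--         out.append('*' if state == 1 else c)
--     return text[:cut] + ''.join(out)
-- ===== Notes on version B (the rewrite author's own statement) =====
-- stated objective: alternative
-- what changed: Replaces A's staged algorithm (two index-mutating while-loop scans to find the word's start and finish, then slicing plus the char-by-char 'censored' mask helper) with one single forward pass over the suffix driven by a 3-state machine (before the word / inside it / past it) that emits '*' or the original character as it goes. Pre_ excludes inputs with i+len(phrase) < 0: there A either raises IndexError or scans via Python negative-index wraparound (an accidental corner no caller would specify, sometimes even returning a string longer than the input), while B follows plain slice semantics; …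
-- outside the precondition, e.g. on censor_word_after('a b', -2, ''): A returns 'a  b', B returns 'a *'
import Mathlib
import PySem

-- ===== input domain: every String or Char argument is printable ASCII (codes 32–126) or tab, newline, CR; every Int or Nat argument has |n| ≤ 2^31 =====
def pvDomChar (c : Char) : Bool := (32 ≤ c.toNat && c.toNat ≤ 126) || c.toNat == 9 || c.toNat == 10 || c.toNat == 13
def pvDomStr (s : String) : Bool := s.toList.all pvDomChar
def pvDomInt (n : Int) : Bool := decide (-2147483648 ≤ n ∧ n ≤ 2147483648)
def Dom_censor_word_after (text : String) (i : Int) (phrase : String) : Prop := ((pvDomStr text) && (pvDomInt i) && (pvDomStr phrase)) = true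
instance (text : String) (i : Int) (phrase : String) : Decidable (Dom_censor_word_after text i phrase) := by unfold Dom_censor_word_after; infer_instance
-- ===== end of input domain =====

-- B replaces A's two index-mutating while-loop scans plus the char-by-char `censored` helper
-- with one single forward pass over the suffix driven by a 3-state machine (before the word /
-- inside it / past it); objective: alternative, same O(n) cost.


-- ===== PORT A =====
-- `while start < len(text) and text[start].isalpha() == <cond>: start += 1`, as a recursion on the
-- remaining distance; the `none` branch of pyGet? is where Python raises IndexError (outside Pre_).
def pvScan (p : Char → Bool) (cs : List Char) (start : Int) : Int :=
  if _h : start < (cs.length : Int) then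
    match PySem.List.pyGet? cs start with
    | none => start        -- Python raises IndexError here (start < -len); excluded by Pre_
    | some c => if p c then pvScan p cs (start + 1) else start
  else start
termination_by ((cs.length : Int) - start).toNat
decreasing_by omega

-- helper `censored`: build the mask char by char (strings handled as List Char throughout)
def pvCensored (phrase : List Char) : List Char :=
  phrase.foldl (fun censor ch => if ch == ' ' then censor ++ [' '] else censor ++ ['*']) []

def censor_word_after (text : String) (i : Int) (phrase : String) : String :=
  let cs := text.toList
  let start := pvScan (fun c => !(PySem.Chars.isalpha c)) cs (i + PySem.Str.len phrase)
  let finish := pvScan (fun c => PySem.Chars.isalpha c) cs start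
  String.mk (PySem.List.slice cs none (some start) ++
             pvCensored (PySem.List.slice cs (some start) (some finish)) ++
             PySem.List.slice cs (some finish) none)

-- ===== PORT B =====
-- transliteration of Source B: the loop body (state update + append) as the fold step
def pvStep (st : Nat × List Char) (c : Char) : Nat × List Char :=
  let a := PySem.Chars.isalpha c
  let state := if st.1 == 0 && a then 1 else if st.1 == 1 && !a then 2 else st.1
  (state, st.2 ++ [if state == 1 then '*' else c])

def censor_word_after_alt (text : String) (i : Int) (phrase : String) : String :=
  let cut := i + PySem.Str.len phrase
  let cs := text.toList
  let out := (PySem.List.slice cs (some cut) none).foldl pvStep (0, [])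
  String.mk (PySem.List.slice cs none (some cut) ++ out.2)

-- ===== PRECONDITION & SPEC =====
-- Pre_ excludes inputs with i + len(phrase) < 0: there A either raises IndexError
-- (i + len(phrase) < -len(text)) or scans via Python negative-index wraparound (an accidental
-- corner no caller would specify, sometimes even returning a string longer than the input),
-- while B follows plain slice semantics; the two coincide on part of that region.
def Pre_censor_word_after (text : String) (i : Int) (phrase : String) : Prop :=
  0 ≤ i + PySem.Str.len phrase
instance (text : String) (i : Int) (phrase : String) : Decidable (Pre_censor_word_after text i phrase) := by unfold Pre_censor_word_after; infer_instance

def pvWitness_censor_word_after : String × Int × String := ("the cat ran.", 0, "the")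

def Spec_censor_word_after (text : String) (i : Int) (phrase : String) (out : String) : Prop := out = censor_word_after_alt text i phrase
instance (text : String) (i : Int) (phrase : String) (out : String) : Decidable (Spec_censor_word_after text i phrase out) := by unfold Spec_censor_word_after; infer_instance

-- ===== CLAIM (what is proved, stated in full; the proofs are below) =====
def Claim_equal_censor_word_after : Prop := ∀ (text : String) (i : Int) (phrase : String), Dom_censor_word_after text i phrase → Pre_censor_word_after text i phrase → Spec_censor_word_after text i phrase (censor_word_after text i phrase)

-- ===== LEMMAS AND PROOFS =====

-- recursive characterisations of B's fold, one per state of the machine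
def pvG1 : List Char → List Char
  | [] => []
  | c :: t => if PySem.Chars.isalpha c then '*' :: pvG1 t else c :: t

def pvG0 : List Char → List Char
  | [] => []
  | c :: t => if PySem.Chars.isalpha c then '*' :: pvG1 t else c :: pvG0 t

theorem pv_step2 (acc : List Char) (c : Char) : pvStep (2, acc) c = (2, acc ++ [c]) := rfl

theorem pv_fold2 (l : List Char) (acc : List Char) : l.foldl pvStep (2, acc) = (2, acc ++ l) := by
  induction l generalizing acc with
  | nil => simp
  | cons c t ih => rw [List.foldl_cons, pv_step2, ih]; simp

theorem pv_fold1 (l : List Char) (acc : List Char) : (l.foldl pvStep (1, acc)).2 = acc ++ pvG1 l := by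
  induction l generalizing acc with
  | nil => simp [pvG1]
  | cons c t ih =>
    by_cases h : PySem.Chars.isalpha c = true
    · have hstep : pvStep (1, acc) c = (1, acc ++ ['*']) := by simp [pvStep, h]
      rw [List.foldl_cons, hstep, ih, pvG1, if_pos h]
      simp
    · have hstep : pvStep (1, acc) c = (2, acc ++ [c]) := by simp [pvStep, h]
      rw [List.foldl_cons, hstep, pv_fold2, pvG1, if_neg h]
      simp

theorem pv_fold0 (l : List Char) (acc : List Char) : (l.foldl pvStep (0, acc)).2 = acc ++ pvG0 l := by
  induction l generalizing acc with
  | nil => simp [pvG0]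
  | cons c t ih =>
    by_cases h : PySem.Chars.isalpha c = true
    · have hstep : pvStep (0, acc) c = (1, acc ++ ['*']) := by simp [pvStep, h]
      rw [List.foldl_cons, hstep, pv_fold1, pvG0, if_pos h]
      simp
    · have hstep : pvStep (0, acc) c = (0, acc ++ [c]) := by simp [pvStep, h]
      rw [List.foldl_cons, hstep, ih, pvG0, if_neg h]
      simp

-- getD of a successor-shifted findIdx?
theorem pv_getD_map_succ (o : Option Nat) (n : Nat) :
    (o.map (· + 1)).getD (n + 1) = o.getD n + 1 := by
  cases o <;> rfl

-- the scan loop of A stops at the first index (from k) whose char falsifies p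
theorem pvScan_eq (p : Char → Bool) (cs : List Char) (k : Nat) :
    pvScan p cs (k : Int) =
      (k : Int) + ((((cs.drop k).findIdx? (fun c => !p c)).getD (cs.drop k).length : Nat) : Int) := by
  have H : ∀ n k, cs.length - k ≤ n → pvScan p cs (k : Int) =
      (k : Int) + ((((cs.drop k).findIdx? (fun c => !p c)).getD (cs.drop k).length : Nat) : Int) := by
    intro n
    induction n with
    | zero =>
      intro k hk
      have hle : cs.length ≤ k := by omega
      rw [pvScan, dif_neg (by exact_mod_cast not_lt.mpr hle), List.drop_eq_nil_of_le hle]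
      simp
    | succ n ih =>
      intro k hk
      by_cases h : k < cs.length
      · have hget : PySem.List.pyGet? cs (k : Int) = some cs[k] := by simp [pysem, h]
        rw [pvScan, dif_pos (by exact_mod_cast h), hget]
        have hred : (match some cs[k] with
            | none => (k : Int)
            | some c => if p c = true then pvScan p cs ((k : Int) + 1) else (k : Int)) =
            if p cs[k] = true then pvScan p cs ((k : Int) + 1) else (k : Int) := rfl
        rw [hred, List.drop_eq_getElem_cons h]
        by_cases hp : p cs[k] = true
        · rw [if_pos hp]
          have hsucc : (k : Int) + 1 = ((k + 1 : Nat) : Int) := by push_cast; ring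
          rw [hsucc, ih (k + 1) (by omega)]
          rw [List.findIdx?_cons, if_neg (by simp [hp]), List.length_cons, pv_getD_map_succ]
          push_cast; ring
        · rw [if_neg hp]
          rw [List.findIdx?_cons, if_pos (by simp [hp])]
          simp
      · have hle : cs.length ≤ k := by omega
        rw [pvScan, dif_neg (by exact_mod_cast not_lt.mpr hle), List.drop_eq_nil_of_le hle]
        simp
  exact H cs.length k (by omega)

-- everything strictly before the first index falsifying p satisfies p
theorem pv_take_findIdx_all (p : Char → Bool) (l : List Char) :
    ∀ c ∈ l.take ((l.findIdx? (fun c => !p c)).getD l.length), p c = true := by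
  induction l with
  | nil => simp
  | cons a l ih =>
    by_cases hp : p a = true
    · simp only [List.findIdx?_cons]
      rw [if_neg (by simp [hp]), List.length_cons, pv_getD_map_succ, List.take_succ_cons]
      intro c hc
      rcases List.mem_cons.mp hc with h | h
      · subst h; exact hp
      · exact ih c h
    · simp only [List.findIdx?_cons]
      rw [if_pos (by simp [hp])]
      simp

theorem pv_findIdx_getD_le (q : Char → Bool) (l : List Char) :
    (l.findIdx? q).getD l.length ≤ l.length := by
  induction l with
  | nil => simp
  | cons a l ih =>
    simp only [List.findIdx?_cons, List.length_cons]
    by_cases hq : q a = true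
    · rw [if_pos hq]; simp
    · rw [if_neg hq, pv_getD_map_succ]; omega

-- on an all-alphabetic word, A's `censored` mask is a run of stars
theorem pvCensored_aux (l : List Char) (acc : List Char)
    (h : ∀ c ∈ l, PySem.Chars.isalpha c = true) :
    l.foldl (fun censor ch => if ch == ' ' then censor ++ [' '] else censor ++ ['*']) acc =
      acc ++ List.replicate l.length '*' := by
  induction l generalizing acc with
  | nil => simp
  | cons a l ih =>
    have ha : (a == ' ') = false := by
      apply beq_eq_false_iff_ne.mpr
      intro he
      have := h a (List.mem_cons_self ..)
      rw [he] at this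
      exact absurd this (by decide)
    simp only [List.foldl_cons, List.length_cons, List.replicate_succ]
    rw [if_neg (by simp [ha]), ih _ (fun c hc => h c (List.mem_cons_of_mem _ hc))]
    simp

theorem pvCensored_alpha (l : List Char) (h : ∀ c ∈ l, PySem.Chars.isalpha c = true) :
    pvCensored l = List.replicate l.length '*' := by
  unfold pvCensored
  rw [pvCensored_aux l [] h]
  simp

-- state 1 emits exactly the alphabetic run as stars, then copies the rest verbatim
theorem pvG1_eq (l : List Char) :
    pvG1 l = List.replicate ((l.findIdx? (fun c => !PySem.Chars.isalpha c)).getD l.length) '*' ++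
      l.drop ((l.findIdx? (fun c => !PySem.Chars.isalpha c)).getD l.length) := by
  induction l with
  | nil => rfl
  | cons a l ih =>
    by_cases h : PySem.Chars.isalpha a = true
    · rw [pvG1, if_pos h, List.findIdx?_cons, if_neg (by simp [h]), List.length_cons,
          pv_getD_map_succ, List.replicate_succ, List.drop_succ_cons, ih]
      simp
    · rw [pvG1, if_neg h, List.findIdx?_cons, if_pos (by simp [h])]
      simp

-- state 0 copies the non-alphabetic gap verbatim, then behaves like state 1
theorem pvG0_eq (l : List Char) :
    pvG0 l = l.take ((l.findIdx? (fun c => PySem.Chars.isalpha c)).getD l.length) ++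
      pvG1 (l.drop ((l.findIdx? (fun c => PySem.Chars.isalpha c)).getD l.length)) := by
  induction l with
  | nil => rfl
  | cons a l ih =>
    by_cases h : PySem.Chars.isalpha a = true
    · rw [pvG0, if_pos h, List.findIdx?_cons, if_pos (by simp [h])]
      simp [pvG1, h]
    · rw [pvG0, if_neg h, List.findIdx?_cons, if_neg (by simp [h]), List.length_cons,
          pv_getD_map_succ, List.take_succ_cons, List.drop_succ_cons, ih]
      simp

-- ===== VERDICT (by name: the statement is the Claim_ definition above) =====
theorem censor_word_after_spec : Claim_equal_censor_word_after := by
  intro text i phrase _ hpre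
  unfold Pre_censor_word_after at hpre
  unfold Spec_censor_word_after
  simp only [censor_word_after, censor_word_after_alt]
  obtain ⟨s, hs⟩ : ∃ s : Nat, i + PySem.Str.len phrase = (s : Int) :=
    ⟨(i + PySem.Str.len phrase).toNat, (Int.toNat_of_nonneg hpre).symm⟩
  rw [hs, pvScan_eq]
  simp only [Bool.not_not]
  rw [← Nat.cast_add, pvScan_eq, ← Nat.cast_add]
  simp only [PySem.List.slice_to_natCast, PySem.List.slice_from_natCast, PySem.List.slice_natCast]
  rw [Nat.add_sub_cancel_left]
  simp only [← List.drop_drop]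
  rw [pvCensored_alpha _ (pv_take_findIdx_all _ _), List.length_take,
      Nat.min_eq_left (pv_findIdx_getD_le _ _), List.take_add]
  rw [pv_fold0, List.nil_append, pvG0_eq, pvG1_eq]
  simp [List.append_assoc]
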